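-- pv_equiv track=rewrite | github.com/hippieperm/Coding-Test | 프로그래머스/0/120815. 피자 나눠 먹기 （2）/피자 나눠 먹기 （2）.py | solution
-- ===== SOURCE A (Python) =====
-- def solution(n):
--     six = 0
--     i = 1
--     while True:
--         six = n * i
--         if six % 6 == 0:
--             break
--         i += 1
--     return six // 6
-- ===== SOURCE B (Python) =====
-- from math import gcd
--
--
-- def solution(n):
--     return n // gcd(n, 6)
-- ===== Notes on version B (the rewrite author's own statement) =====
-- stated objective: simpler
-- what changed: Replaces A's trial loop (searching the smallest multiple of n divisible by 6) with the closed form n // gcd(n, 6).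
import Mathlib
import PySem

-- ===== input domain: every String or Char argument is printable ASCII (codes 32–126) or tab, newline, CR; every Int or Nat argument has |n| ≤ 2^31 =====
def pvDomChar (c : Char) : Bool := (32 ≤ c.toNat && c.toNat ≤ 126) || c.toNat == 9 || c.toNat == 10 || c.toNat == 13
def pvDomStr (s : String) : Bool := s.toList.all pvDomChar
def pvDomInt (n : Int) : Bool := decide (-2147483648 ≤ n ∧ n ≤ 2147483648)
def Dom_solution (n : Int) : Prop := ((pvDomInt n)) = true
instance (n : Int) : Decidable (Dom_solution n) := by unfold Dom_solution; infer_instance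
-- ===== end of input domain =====

-- B replaces A's trial loop with the closed form n // gcd(n, 6); objective: simpler.


-- ===== PORT A =====
-- A's `while True` loop: try i = 1, 2, … until n*i is divisible by 6; the loop always
-- stops by i = 6 (6 divides n*6), so a fuel of 6 suffices (fuel only makes it total).
def solLoop (n : Int) : Nat → Int → Int
  | 0, _ => 0
  | f+1, i => if PySem.Int.mod (n * i) 6 = 0 then PySem.Int.floordiv (n * i) 6
              else solLoop n f (i + 1)

def solution (n : Int) : Int := solLoop n 6 1

-- ===== PORT B =====
def solution_alt (n : Int) : Int := PySem.Int.floordiv n ((Int.gcd n 6 : Nat) : Int)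

-- ===== PRECONDITION & SPEC =====
def Spec_solution (n : Int) (out : Int) : Prop := out = solution_alt n
instance (n : Int) (out : Int) : Decidable (Spec_solution n out) := by unfold Spec_solution; infer_instance

-- ===== CLAIM (what is proved, stated in full; the proofs are below) =====
def Claim_equal_solution : Prop := ∀ (n : Int), Dom_solution n → Spec_solution n (solution n)

-- ===== LEMMAS AND PROOFS =====

-- ===== VERDICT (by name: the statement is the Claim_ definition above) =====
theorem solution_spec : Claim_equal_solution := by
  intro n _
  unfold Spec_solution solution solution_alt
  rw [← Int.gcd_emod n 6]
  have hm : ∀ i : Int, PySem.Int.mod (n * i) 6 = (n * i) % 6 :=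
    fun i => PySem.Int.mod_eq_emod_of_pos (by norm_num)
  have hd : ∀ i : Int, PySem.Int.floordiv (n * i) 6 = (n * i) / 6 :=
    fun i => PySem.Int.floordiv_eq_ediv_of_pos (by norm_num)
  have hr : n % 6 = 0 ∨ n % 6 = 1 ∨ n % 6 = 2 ∨ n % 6 = 3 ∨ n % 6 = 4 ∨ n % 6 = 5 := by omega
  rcases hr with h | h | h | h | h | h <;>
    rw [h] <;>
    simp only [solLoop, hm, hd] <;>
    norm_num [Int.gcd] <;>
    split_ifs <;> omega
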